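-- pv_equiv track=rewrite | github.com/shahmeerathar/advent-of-code | 2025/day-eight/aoc_day_eight.py | find_circuits
-- ===== SOURCE A (Python) =====
-- def find_circuits(circuits, j1, j2):
--     circuit_with_first = -1
--     circuit_with_second = -1
--     for idx, circuit in enumerate(circuits):
--         if j1 in circuit:
--             circuit_with_first = idx
--         if j2 in circuit:
--             circuit_with_second = idx
--
--     return circuit_with_first, circuit_with_second
-- ===== SOURCE B (Python) =====
-- def find_circuits(circuits, j1, j2):
--     circuit_with_first = -1
--     circuit_with_second = -1
--     found_first = False
--     found_second = False
--     for idx in range(len(circuits) - 1, -1, -1):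
--         circuit = circuits[idx]
--         if not found_first and j1 in circuit:
--             circuit_with_first = idx
--             found_first = True
--         if not found_second and j2 in circuit:
--             circuit_with_second = idx
--             found_second = True
--         if found_first and found_second:
--             break
--     return circuit_with_first, circuit_with_second
-- ===== Notes on version B (the rewrite author's own statement) =====
-- stated objective: alternative
-- what changed: B scans the circuits backwards with found-flags and an early break as soon as both junctions are located (the first reverse match equals A's last forward match), instead of A's full forward pass that keeps overwriting both indices.
import Mathlib
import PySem

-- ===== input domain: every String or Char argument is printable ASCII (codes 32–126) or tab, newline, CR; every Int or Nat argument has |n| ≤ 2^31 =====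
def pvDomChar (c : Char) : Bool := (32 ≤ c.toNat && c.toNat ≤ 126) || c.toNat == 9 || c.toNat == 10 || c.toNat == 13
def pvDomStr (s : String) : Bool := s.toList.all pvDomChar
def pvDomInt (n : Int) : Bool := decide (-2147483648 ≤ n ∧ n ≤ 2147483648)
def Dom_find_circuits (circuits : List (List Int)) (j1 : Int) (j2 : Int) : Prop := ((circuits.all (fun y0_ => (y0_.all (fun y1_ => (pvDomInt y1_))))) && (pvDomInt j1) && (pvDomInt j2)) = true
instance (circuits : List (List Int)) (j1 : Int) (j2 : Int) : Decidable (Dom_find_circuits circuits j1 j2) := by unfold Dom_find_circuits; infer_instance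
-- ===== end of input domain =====

-- B scans the circuits backwards with found-flags and an early break (first reverse
-- match = A's last forward match); same return value, different traversal (objective: alternative).


-- ===== PORT A =====
-- A: one forward pass over enumerate(circuits), overwriting both indices on each hit.
def find_circuits (circuits : List (List Int)) (j1 : Int) (j2 : Int) : Int × Int :=
  (PySem.List.enumerate circuits 0).foldl
    (fun (st : Int × Int) (p : Int × List Int) =>
      let st1 := if p.2.contains j1 then (p.1, st.2) else st
      if p.2.contains j2 then (st1.1, p.1) else st1)
    (-1, -1)

-- ===== PORT B =====
-- B's loop 'for idx in range(len(circuits)-1, -1, -1)': n is the number of indices still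
-- to visit, the next index visited is n-1.  circuits[idx] is always in range here, so
-- List.getD is exact for the Python indexing.
def findCircuitsAltGo (circuits : List (List Int)) (j1 : Int) (j2 : Int) :
    Nat → Int → Int → Bool → Bool → Int × Int
  | 0, c1, c2, _, _ => (c1, c2)
  | n + 1, c1, c2, f1, f2 =>
    let circuit := circuits.getD n []
    let p1 : Int × Bool := if !f1 && circuit.contains j1 then ((n : Int), true) else (c1, f1)
    let p2 : Int × Bool := if !f2 && circuit.contains j2 then ((n : Int), true) else (c2, f2)
    if p1.2 && p2.2 then (p1.1, p2.1)
    else findCircuitsAltGo circuits j1 j2 n p1.1 p2.1 p1.2 p2.2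

def find_circuits_alt (circuits : List (List Int)) (j1 : Int) (j2 : Int) : Int × Int :=
  findCircuitsAltGo circuits j1 j2 circuits.length (-1) (-1) false false

-- ===== PRECONDITION & SPEC =====
def Spec_find_circuits (circuits : List (List Int)) (j1 : Int) (j2 : Int) (out : Int × Int) : Prop := out = find_circuits_alt circuits j1 j2
instance (circuits : List (List Int)) (j1 : Int) (j2 : Int) (out : Int × Int) : Decidable (Spec_find_circuits circuits j1 j2 out) := by unfold Spec_find_circuits; infer_instance

-- ===== CLAIM (what is proved, stated in full; the proofs are below) =====
def Claim_equal_find_circuits : Prop := ∀ (circuits : List (List Int)) (j1 : Int) (j2 : Int), Dom_find_circuits circuits j1 j2 → Spec_find_circuits circuits j1 j2 (find_circuits circuits j1 j2)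

-- ===== LEMMAS AND PROOFS =====

-- Reference: index of the last circuit among the first n containing j, scanned from the back.
def lastHit (circuits : List (List Int)) (j : Int) : Nat → Int
  | 0 => -1
  | n + 1 => if (circuits.getD n []).contains j then (n : Int) else lastHit circuits j n

theorem lastHit_append (l : List (List Int)) (x : List Int) (j : Int) :
    ∀ n, n ≤ l.length → lastHit (l ++ [x]) j n = lastHit l j n := by
  intro n
  induction n with
  | zero => intro _; rfl
  | succ m ih =>
    intro h
    have hm : m < l.length := Nat.lt_of_succ_le h
    simp [lastHit, ih (Nat.le_of_lt hm), List.getD, List.getElem?_append_left hm]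

theorem go_eq_lastHit (circuits : List (List Int)) (j1 j2 : Int) :
    ∀ (n : Nat) (c1 c2 : Int) (f1 f2 : Bool),
      (f1 = false → c1 = -1) → (f2 = false → c2 = -1) →
      findCircuitsAltGo circuits j1 j2 n c1 c2 f1 f2 =
        ((if f1 then c1 else lastHit circuits j1 n),
         (if f2 then c2 else lastHit circuits j2 n)) := by
  intro n
  induction n with
  | zero =>
    intro c1 c2 f1 f2 hc1 hc2
    cases f1 <;> cases f2 <;> simp_all [findCircuitsAltGo, lastHit]
  | succ m ih =>
    intro c1 c2 f1 f2 hc1 hc2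
    simp only [findCircuitsAltGo]
    cases f1 <;> cases f2 <;> simp_all <;>
      by_cases h1 : j1 ∈ circuits[m]?.getD [] <;>
      by_cases h2 : j2 ∈ circuits[m]?.getD [] <;>
      simp [List.getD, h1, h2, ih, lastHit]

theorem A_eq_lastHit (circuits : List (List Int)) (j1 j2 : Int) :
    find_circuits circuits j1 j2 =
      (lastHit circuits j1 circuits.length, lastHit circuits j2 circuits.length) := by
  induction circuits using List.reverseRecOn with
  | nil => rfl
  | append_singleton l x ih =>
    have hlen : (l ++ [x]).length = l.length + 1 := by simp
    unfold find_circuits at ih ⊢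
    rw [PySem.List.enumerate_append, List.foldl_append, ih, hlen]
    simp only [PySem.List.enumerate_cons, PySem.List.enumerate_nil, List.foldl_cons,
      List.foldl_nil, lastHit]
    have hg : (l ++ [x]).getD l.length [] = x := by
      simp [List.getD]
    rw [hg, lastHit_append l x j1 l.length (Nat.le_refl _),
        lastHit_append l x j2 l.length (Nat.le_refl _)]
    by_cases h1 : j1 ∈ x <;> by_cases h2 : j2 ∈ x <;> simp [h1, h2]

-- ===== VERDICT (by name: the statement is the Claim_ definition above) =====
theorem find_circuits_spec : Claim_equal_find_circuits := by
  intro circuits j1 j2 _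
  unfold Spec_find_circuits find_circuits_alt
  rw [go_eq_lastHit circuits j1 j2 circuits.length (-1) (-1) false false
        (fun _ => rfl) (fun _ => rfl), A_eq_lastHit]
  simp
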